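-- pv_equiv track=rewrite | github.com/AnimalByte/AWphase | python/awphase_py/select_stable_benchmark_windows_v1.py | bin_positions
-- ===== SOURCE A (Python) =====
-- def bin_positions(positions, start, end, window_bp, step_bp):
--     positions = sorted(p for p in positions if start <= p <= end)
--     out = []
--     i = start
--     pos_idx = 0
--
--     while i + window_bp - 1 <= end:
--         w_start = i
--         w_end = i + window_bp - 1
--
--         # Count with simple scan.
--         while pos_idx < len(positions) and positions[pos_idx] < w_start:
--             pos_idx += 1
--         j = pos_idx
--         n = 0
--         while j < len(positions) and positions[j] <= w_end:
--             n += 1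
--             j += 1
--
--         out.append((w_start, w_end, n))
--         i += step_bp
--
--     return out
-- ===== SOURCE B (Python) =====
-- def bin_positions(positions, start, end, window_bp, step_bp):
--     # closed-form window enumeration + direct per-window count; no sorting, no pointer state
--     last = end - window_bp + 1
--     if start > last:
--         return []
--     nwin = (last - start) // step_bp + 1
--     return [(w, w + window_bp - 1,
--              sum(1 for p in positions if w <= p <= w + window_bp - 1))
--             for w in (start + k * step_bp for k in range(nwin))]
-- ===== Notes on version B (the rewrite author's own statement) =====
-- stated objective: simpler
-- what changed: B replaces A's sort-then-incremental-two-pointer scan over a mutating pos_idx by a closed-form count of windows (floor division) and a stateless direct membership count per window, with no sorting and no cross-window state.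
import Mathlib
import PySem

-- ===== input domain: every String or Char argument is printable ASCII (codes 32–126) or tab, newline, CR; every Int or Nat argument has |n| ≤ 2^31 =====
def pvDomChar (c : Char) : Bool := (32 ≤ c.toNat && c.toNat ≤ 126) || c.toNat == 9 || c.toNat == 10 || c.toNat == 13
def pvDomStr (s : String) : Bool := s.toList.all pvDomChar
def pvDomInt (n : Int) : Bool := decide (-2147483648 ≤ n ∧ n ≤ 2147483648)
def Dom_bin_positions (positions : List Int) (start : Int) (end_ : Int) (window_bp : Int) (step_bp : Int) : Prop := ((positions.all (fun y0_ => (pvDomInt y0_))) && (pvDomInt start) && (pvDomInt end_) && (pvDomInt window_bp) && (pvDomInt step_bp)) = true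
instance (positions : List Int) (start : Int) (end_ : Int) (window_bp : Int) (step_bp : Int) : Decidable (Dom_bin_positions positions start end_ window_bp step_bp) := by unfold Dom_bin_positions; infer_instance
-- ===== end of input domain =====

-- ===== PORT A =====
-- B replaces A's sort + two-pointer scans by a closed-form window list with a direct count per window (objective: simpler).
-- Helper for A's inner `while pos_idx < len(positions) and positions[pos_idx] < w_start` loop.
def pvAdvance (s : List Int) (w : Int) (j : Nat) : Nat :=
  if h : j < s.length ∧ s.getD j 0 < w then pvAdvance s w (j + 1) else j
termination_by s.length - j
decreasing_by omega

-- Helper for A's inner counting loop `while j < len(positions) and positions[j] <= w_end`.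
def pvCountLoop (s : List Int) (we : Int) (j : Nat) (n : Int) : Int :=
  if h : j < s.length ∧ s.getD j 0 ≤ we then pvCountLoop s we (j + 1) (n + 1) else n
termination_by s.length - j
decreasing_by omega

-- A's outer `while i + window_bp - 1 <= end` loop; fuel bounds the iteration count (A diverges when
-- step_bp <= 0 and the loop body is reachable; Pre_ excludes exactly those inputs).
def pvALoop (s : List Int) (end_ wbp step : Int) : Nat → Int → Nat → List (Int × Int × Int)
  | 0, _, _ => []
  | fuel + 1, i, posIdx =>
    if i + wbp - 1 ≤ end_ then
      let wStart := i
      let wEnd := i + wbp - 1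
      let posIdx' := pvAdvance s wStart posIdx
      let n := pvCountLoop s wEnd posIdx' 0
      (wStart, wEnd, n) :: pvALoop s end_ wbp step fuel (i + step) posIdx'
    else []

def bin_positions (positions : List Int) (start : Int) (end_ : Int) (window_bp : Int) (step_bp : Int) : List (Int × Int × Int) :=
  let s := PySem.List.sorted (positions.filter (fun p => decide (start ≤ p) && decide (p ≤ end_))) id false
  pvALoop s end_ window_bp step_bp (end_ + 2 - window_bp - start).toNat start 0

-- ===== PORT B =====
def bin_positions_alt (positions : List Int) (start : Int) (end_ : Int) (window_bp : Int) (step_bp : Int) : List (Int × Int × Int) :=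
  let last := end_ - window_bp + 1
  if start > last then []
  else
    let nwin := PySem.Int.floordiv (last - start) step_bp + 1
    (PySem.List.pyRange 0 nwin 1).map (fun k =>
      let w := start + k * step_bp
      (w, w + window_bp - 1,
        ((positions.countP (fun p => decide (w ≤ p) && decide (p ≤ w + window_bp - 1))).cast : Int)))

-- ===== PRECONDITION & SPEC =====
-- Pre_ excludes exactly the inputs on which A never returns: with step_bp <= 0 and a first window
-- fitting inside [start, end_], A's outer while loop runs forever.
def Pre_bin_positions (positions : List Int) (start : Int) (end_ : Int) (window_bp : Int) (step_bp : Int) : Prop :=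
  0 < step_bp ∨ end_ < start + window_bp - 1
instance (positions : List Int) (start : Int) (end_ : Int) (window_bp : Int) (step_bp : Int) : Decidable (Pre_bin_positions positions start end_ window_bp step_bp) := by unfold Pre_bin_positions; infer_instance

def pvWitness_bin_positions : List Int × Int × Int × Int × Int := ([5, 1, 3, 9, 3], 0, 10, 4, 2)

def Spec_bin_positions (positions : List Int) (start : Int) (end_ : Int) (window_bp : Int) (step_bp : Int) (out : List (Int × Int × Int)) : Prop := out = bin_positions_alt positions start end_ window_bp step_bp
instance (positions : List Int) (start : Int) (end_ : Int) (window_bp : Int) (step_bp : Int) (out : List (Int × Int × Int)) : Decidable (Spec_bin_positions positions start end_ window_bp step_bp out) := by unfold Spec_bin_positions; infer_instance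

-- ===== CLAIM (what is proved, stated in full; the proofs are below) =====
def Claim_equal_bin_positions : Prop := ∀ (positions : List Int) (start : Int) (end_ : Int) (window_bp : Int) (step_bp : Int), Dom_bin_positions positions start end_ window_bp step_bp → Pre_bin_positions positions start end_ window_bp step_bp → Spec_bin_positions positions start end_ window_bp step_bp (bin_positions positions start end_ window_bp step_bp)

-- ===== LEMMAS AND PROOFS =====

-- A recursive middle form shared by both directions of the proof.
def pvBSpec (positions : List Int) (end_ wbp step : Int) : Nat → Int → List (Int × Int × Int)
  | 0, _ => []
  | fuel + 1, i =>
    if i + wbp - 1 ≤ end_ then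
      (i, i + wbp - 1,
        ((positions.countP (fun p => decide (i ≤ p) && decide (p ≤ i + wbp - 1))).cast : Int))
        :: pvBSpec positions end_ wbp step fuel (i + step)
    else []

theorem pvAdvance_eq (s : List Int) (w : Int) (j : Nat) (hj : j ≤ s.length) :
    pvAdvance s w j = j + ((s.drop j).takeWhile (fun p => decide (p < w))).length := by
  fun_induction pvAdvance s w j with
  | case1 j h ih =>
    obtain ⟨h1, h2⟩ := h
    rw [List.drop_eq_getElem_cons h1]
    rw [List.getD_eq_getElem s 0 h1] at h2
    simp [List.takeWhile, h2, ih (by omega)]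
    omega
  | case2 j h =>
    by_cases h1 : j < s.length
    · have h2 : ¬ s.getD j 0 < w := by tauto
      rw [List.drop_eq_getElem_cons h1]
      rw [List.getD_eq_getElem s 0 h1] at h2
      simp [List.takeWhile, h2]
    · have : s.length ≤ j := by omega
      simp [List.drop_eq_nil_of_le this]

theorem pvCountLoop_eq (s : List Int) (we : Int) (j : Nat) (n : Int) (hj : j ≤ s.length) :
    pvCountLoop s we j n = n + ((s.drop j).takeWhile (fun p => decide (p ≤ we))).length := by
  fun_induction pvCountLoop s we j n with
  | case1 j n h ih =>
    obtain ⟨h1, h2⟩ := h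
    rw [List.drop_eq_getElem_cons h1]
    rw [List.getD_eq_getElem s 0 h1] at h2
    simp [List.takeWhile, h2, ih (by omega)]
    omega
  | case2 j n h =>
    by_cases h1 : j < s.length
    · have h2 : ¬ s.getD j 0 ≤ we := by tauto
      rw [List.drop_eq_getElem_cons h1]
      rw [List.getD_eq_getElem s 0 h1] at h2
      simp [List.takeWhile, h2]
    · have : s.length ≤ j := by omega
      simp [List.drop_eq_nil_of_le this]

theorem pv_drop_takeWhile (t : List Int) (p : Int → Bool) :
    t.drop (t.takeWhile p).length = t.dropWhile p := by
  induction t with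
  | nil => simp
  | cons a t ih => by_cases h : p a <;> simp [List.takeWhile, List.dropWhile, h, ih]

theorem pv_mem_dropWhile_ge (t : List Int) (i : Int) (hs : t.Pairwise (· ≤ ·)) :
    ∀ p ∈ t.dropWhile (fun p => decide (p < i)), i ≤ p := by
  induction t with
  | nil => simp
  | cons a t ih =>
    intro p hp
    by_cases h : a < i
    · simp [List.dropWhile, h] at hp
      exact ih hs.tail p hp
    · simp [List.dropWhile, h] at hp
      rcases hp with rfl | hp
      · omega
      · have := (List.pairwise_cons.mp hs).1 p hp; omega

theorem pv_countP_sorted_le (u : List Int) (we : Int) (hs : u.Pairwise (· ≤ ·)) :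
    u.countP (fun p => decide (p ≤ we)) = (u.takeWhile (fun p => decide (p ≤ we))).length := by
  induction u with
  | nil => simp
  | cons a u ih =>
    by_cases h : a ≤ we
    · simp [List.takeWhile, h, ih hs.tail]
    · have hz : u.countP (fun p => decide (p ≤ we)) = 0 := by
        rw [List.countP_eq_zero]
        intro p hp
        have := (List.pairwise_cons.mp hs).1 p hp
        simp; omega
      simp [List.takeWhile, h, hz]

-- One iteration of A's two inner scans computes the window's membership count.
theorem pv_inner_count (s : List Int) (i we : Int) (j0 : Nat)
    (hs : s.Pairwise (· ≤ ·)) (hj : j0 ≤ s.length)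
    (hpre : ∀ p ∈ s.take j0, p < i) :
    pvCountLoop s we (pvAdvance s i j0) 0 =
      ((s.countP (fun p => decide (i ≤ p) && decide (p ≤ we))).cast : Int)
    ∧ pvAdvance s i j0 ≤ s.length
    ∧ (∀ p ∈ s.take (pvAdvance s i j0), p < i) := by
  set t := s.drop j0 with ht
  set tw := t.takeWhile (fun p => decide (p < i)) with htw
  have hlen : tw.length ≤ t.length := (List.takeWhile_prefix _).length_le
  have htlen : t.length = s.length - j0 := by simp [ht]
  have hadv : pvAdvance s i j0 = j0 + tw.length := pvAdvance_eq s i j0 hj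
  have hj1 : pvAdvance s i j0 ≤ s.length := by omega
  have htake : s.take (pvAdvance s i j0) = s.take j0 ++ tw := by
    have h2 : List.take tw.length t = tw := (List.prefix_iff_eq_take.mp (List.takeWhile_prefix _)).symm
    rw [hadv, List.take_add, ← ht, h2]
  have hinv : ∀ p ∈ s.take (pvAdvance s i j0), p < i := by
    intro p hp
    rw [htake, List.mem_append] at hp
    rcases hp with hp | hp
    · exact hpre p hp
    · have := List.mem_takeWhile_imp hp
      simpa using this
  refine ⟨?_, hj1, hinv⟩
  have hdrop : s.drop (pvAdvance s i j0) = t.dropWhile (fun p => decide (p < i)) := by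
    rw [hadv, ← pv_drop_takeWhile t (fun p => decide (p < i)), ht, List.drop_drop]
  rw [pvCountLoop_eq s we _ 0 hj1, hdrop]
  set u := t.dropWhile (fun p => decide (p < i)) with hu
  have hts : t.Pairwise (· ≤ ·) := hs.drop
  have hu_ge : ∀ p ∈ u, i ≤ p := pv_mem_dropWhile_ge t i hts
  have hus : u.Pairwise (· ≤ ·) := by
    rw [hu, ← pv_drop_takeWhile t (fun p => decide (p < i))]
    exact hts.drop
  have hsplit : s = s.take (pvAdvance s i j0) ++ u := by
    rw [← hdrop, List.take_append_drop]
  have hcnt : s.countP (fun p => decide (i ≤ p) && decide (p ≤ we))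
      = u.countP (fun p => decide (i ≤ p) && decide (p ≤ we)) := by
    conv_lhs => rw [hsplit]
    rw [List.countP_append]
    have h0 : (s.take (pvAdvance s i j0)).countP (fun p => decide (i ≤ p) && decide (p ≤ we)) = 0 := by
      rw [List.countP_eq_zero]
      intro p hp
      have := hinv p hp
      simp
      omega
    omega
  have hcnt2 : u.countP (fun p => decide (i ≤ p) && decide (p ≤ we))
      = u.countP (fun p => decide (p ≤ we)) := by
    apply List.countP_congr
    intro p hp
    have := hu_ge p hp
    simp [this]
  rw [hcnt, hcnt2, pv_countP_sorted_le u we hus]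
  omega

theorem pvALoop_eq_pvBSpec (positions : List Int) (start end_ wbp step : Int)
    (hstep : 0 < step)
    (s : List Int)
    (hs : s = PySem.List.sorted (positions.filter (fun p => decide (start ≤ p) && decide (p ≤ end_))) id false) :
    ∀ (fuel : Nat) (i : Int) (j0 : Nat), j0 ≤ s.length → (∀ p ∈ s.take j0, p < i) → start ≤ i →
    pvALoop s end_ wbp step fuel i j0 = pvBSpec positions end_ wbp step fuel i := by
  intro fuel
  induction fuel with
  | zero => intro i j0 _ _ _; simp [pvALoop, pvBSpec]
  | succ fuel ih =>
    intro i j0 hj hinv hstart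
    by_cases hc : i + wbp - 1 ≤ end_
    · have hsp : s.Pairwise (· ≤ ·) := by
        rw [hs]
        have := PySem.List.sorted_pairwise (positions.filter (fun p => decide (start ≤ p) && decide (p ≤ end_))) (id : Int → Int)
        simpa using this
      obtain ⟨hcount, hj1, hinv1⟩ := pv_inner_count s i (i + wbp - 1) j0 hsp hj hinv
      have htrans : s.countP (fun p => decide (i ≤ p) && decide (p ≤ i + wbp - 1))
          = positions.countP (fun p => decide (i ≤ p) && decide (p ≤ i + wbp - 1)) := by
        rw [hs, (PySem.List.sorted_perm _ _ _).countP_eq, List.countP_filter]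
        apply List.countP_congr
        intro p hp
        by_cases h1 : i ≤ p <;> by_cases h2 : p ≤ i + wbp - 1 <;> (simp [h1, h2]; try omega)
      simp only [pvALoop, pvBSpec, if_pos hc]
      refine congrArg₂ List.cons ?_
        (ih (i + step) (pvAdvance s i j0) hj1 (fun p hp => by have := hinv1 p hp; omega) (by omega))
      rw [hcount, htrans]
    · cases fuel <;> simp [pvALoop, pvBSpec, hc]

theorem pvAlt_eq_pvBSpec (positions : List Int) (start end_ wbp step : Int)
    (hstep : 0 < step) :
    ∀ (fuel : Nat) (k : Int), 0 ≤ k →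
    (PySem.Int.floordiv (end_ - wbp + 1 - start) step + 1 - k).toNat ≤ fuel →
    (PySem.List.pyRange k (PySem.Int.floordiv (end_ - wbp + 1 - start) step + 1) 1).map (fun k =>
      let w := start + k * step
      (w, w + wbp - 1,
        ((positions.countP (fun p => decide (w ≤ p) && decide (p ≤ w + wbp - 1))).cast : Int)))
    = pvBSpec positions end_ wbp step fuel (start + k * step) := by
  intro fuel
  induction fuel with
  | zero =>
    intro k hk hfuel
    have hge : PySem.Int.floordiv (end_ - wbp + 1 - start) step + 1 ≤ k := by omega
    rw [PySem.List.pyRange_one_eq_nil hge]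
    simp [pvBSpec]
  | succ fuel ih =>
    intro k hk hfuel
    by_cases hlt : k < PySem.Int.floordiv (end_ - wbp + 1 - start) step + 1
    · have hkq : k ≤ PySem.Int.floordiv (end_ - wbp + 1 - start) step := by omega
      have hmul : k * step ≤ end_ - wbp + 1 - start :=
        (PySem.Int.le_floordiv_iff_mul_le hstep).mp hkq
      have hcond : start + k * step + wbp - 1 ≤ end_ := by omega
      rw [PySem.List.pyRange_one_cons hlt, List.map_cons]
      simp only [pvBSpec, if_pos hcond]
      exact congrArg₂ List.cons rfl (by
        have h2 := ih (k + 1) (by omega) (by omega)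
        have harg : start + (k + 1) * step = start + k * step + step := by ring
        rw [harg] at h2
        exact h2)
    · have hge : PySem.Int.floordiv (end_ - wbp + 1 - start) step + 1 ≤ k := by omega
      rw [PySem.List.pyRange_one_eq_nil hge]
      have hmul : ¬ (k * step ≤ end_ - wbp + 1 - start) := by
        intro hm
        exact absurd ((PySem.Int.le_floordiv_iff_mul_le hstep).mpr hm) (by omega)
      have hcond : ¬ (start + k * step + wbp - 1 ≤ end_) := by omega
      simp [pvBSpec, hcond]

-- ===== VERDICT (by name: the statement is the Claim_ definition above) =====
theorem pvALoop_nil (s : List Int) (end_ wbp step : Int) (fuel : Nat) (i : Int) (j0 : Nat)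
    (hc : ¬ i + wbp - 1 ≤ end_) : pvALoop s end_ wbp step fuel i j0 = [] := by
  cases fuel <;> simp [pvALoop, hc]

theorem bin_positions_spec : Claim_equal_bin_positions := by
  intro positions start end_ window_bp step_bp _ hpre
  unfold Spec_bin_positions bin_positions bin_positions_alt
  by_cases hfit : start + window_bp - 1 ≤ end_
  · have hstep : 0 < step_bp := by
      rcases hpre with h | h
      · exact h
      · omega
    have hif : ¬ start > end_ - window_bp + 1 := by omega
    rw [if_neg hif]
    set s := PySem.List.sorted (positions.filter (fun p => decide (start ≤ p) && decide (p ≤ end_))) id false with hs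
    set d := end_ - window_bp + 1 - start with hd
    set q := PySem.Int.floordiv d step_bp with hq
    have hd0 : 0 ≤ d := by omega
    have hq0 : 0 ≤ q := (PySem.Int.le_floordiv_iff_mul_le hstep).mpr (by omega)
    have hqd : q * step_bp ≤ d := (PySem.Int.le_floordiv_iff_mul_le hstep).mp le_rfl
    have hqle : q ≤ d := by nlinarith
    have hfuel : (q + 1 - 0).toNat ≤ (end_ + 2 - window_bp - start).toNat := by omega
    have hA := pvALoop_eq_pvBSpec positions start end_ window_bp step_bp hstep s hs
      (end_ + 2 - window_bp - start).toNat start 0 (by omega) (by simp) le_rfl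
    have hB := pvAlt_eq_pvBSpec positions start end_ window_bp step_bp hstep
      (end_ + 2 - window_bp - start).toNat 0 le_rfl hfuel
    rw [show start + 0 * step_bp = start from by ring] at hB
    rw [hA]
    exact hB.symm
  · rw [pvALoop_nil _ _ _ _ _ _ _ hfit, if_pos (by omega)]
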